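-- pv_equiv track=rewrite | github.com/RU-SIT/DiSC-AMC | src/evaluation/utils.py | sort_results_by_prompt
-- ===== SOURCE A (Python) =====
-- from typing import Dict, List, Tuple, Optional
--
-- def sort_results_by_prompt(results: List[Dict]) -> Dict[int, List[Dict]]:
--     """Sort results by prompt filename and assign numeric keys (deterministic order)."""
--     sorted_results = {}
--     prompts_to_id = {}
--     prompt_id = 0
--
--     all_prompts = list(dict.fromkeys(r['filename'] for r in results))
--     for prompt in all_prompts:
--         if prompt not in prompts_to_id:
--             prompts_to_id[prompt] = prompt_id
--             prompt_id += 1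
--
--     for result in results:
--         current_id = prompts_to_id[result['filename']]
--         sorted_results.setdefault(current_id, []).append(result)
--
--     return sorted_results
-- ===== SOURCE B (Python) =====
-- from typing import Dict, List
--
-- def sort_results_by_prompt(results: List[Dict]) -> Dict[int, List[Dict]]:
--     """Peel off one filename-group per pass by repeated partition (no lookup table)."""
--     sorted_results = {}
--     prompt_id = 0
--     remaining = results
--     while remaining:
--         name = remaining[0]['filename']
--         sorted_results[prompt_id] = [r for r in remaining if r['filename'] == name]
--         remaining = [r for r in remaining if r['filename'] != name]
--         prompt_id += 1
--     return sorted_results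
-- ===== Notes on version B (the rewrite author's own statement) =====
-- stated objective: alternative
-- what changed: B uses no dictionaries or id table at all: it repeatedly partitions the remaining list on the first element's filename, emitting one numbered group per pass, instead of A's hash-based staged passes (dedup filenames, build a filename-to-id table, then group into a dict keyed by id).
import Mathlib
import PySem

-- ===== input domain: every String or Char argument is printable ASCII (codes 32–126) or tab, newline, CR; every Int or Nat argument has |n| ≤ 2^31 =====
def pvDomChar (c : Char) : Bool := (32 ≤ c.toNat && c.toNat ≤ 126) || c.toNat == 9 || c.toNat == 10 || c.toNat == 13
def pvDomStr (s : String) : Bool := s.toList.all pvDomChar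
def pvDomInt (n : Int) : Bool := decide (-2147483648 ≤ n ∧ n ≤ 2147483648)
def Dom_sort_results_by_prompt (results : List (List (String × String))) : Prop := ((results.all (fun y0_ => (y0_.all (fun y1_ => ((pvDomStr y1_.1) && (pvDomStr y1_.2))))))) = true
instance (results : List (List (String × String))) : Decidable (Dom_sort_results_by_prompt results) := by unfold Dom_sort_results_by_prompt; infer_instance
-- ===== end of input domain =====

-- B peels off one filename-group per pass by repeatedly partitioning the remaining list (no dict,
-- no id table), instead of A's staged hash passes (objective: alternative algorithm, same result).

-- shared helper: result['filename'] (KeyError = key absent, excluded by Pre_; "" never reached inside Pre_)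
def pvFilename (r : List (String × String)) : String := (PySem.Dict.mk r).getD "filename" ""

-- ===== PORT A =====
-- A-side helpers: the 'prompts_to_id' loop (with its running counter) over all_prompts
def pvPtiStep (p : PySem.Dict String Int × Int) (prompt : String) : PySem.Dict String Int × Int :=
  if p.1.contains prompt then p else (p.1.insert prompt p.2, p.2 + 1)

def sort_results_by_prompt (results : List (List (String × String))) : List (Int × List (List (String × String))) :=
  -- all_prompts = list(dict.fromkeys(...)); prompts_to_id built by the counter loop
  let allPrompts := PySem.List.dedup (results.map pvFilename)
  let pti := allPrompts.foldl pvPtiStep (PySem.Dict.empty, 0)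
  -- second loop: sorted_results.setdefault(current_id, []).append(result)
  let sortedResults := results.foldl
      (fun (d : PySem.Dict Int (List (List (String × String)))) r =>
        d.modify (pti.1.getD (pvFilename r) 0) [] (fun g => g ++ [r]))
      PySem.Dict.empty
  sortedResults.items

-- ===== PORT B =====
-- the 'while remaining:' loop: emit (prompt_id, matching results), keep only the rest, bump the id
def pvAltLoop (remaining : List (List (String × String))) (promptId : Int)
    (out : List (Int × List (List (String × String)))) : List (Int × List (List (String × String))) :=
  match remaining with
  | [] => out
  | r :: t =>
    let name := pvFilename r
    pvAltLoop ((r :: t).filter (fun s => !(pvFilename s == name))) (promptId + 1)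
      (out ++ [(promptId, (r :: t).filter (fun s => pvFilename s == name))])
termination_by remaining.length
decreasing_by
  simp only [List.filter_cons, beq_self_eq_true, Bool.not_true, List.length_cons]
  exact Nat.lt_succ_of_le (List.length_filter_le _ t)

def sort_results_by_prompt_alt (results : List (List (String × String))) : List (Int × List (List (String × String))) :=
  pvAltLoop results 0 []

-- ===== PRECONDITION & SPEC =====
-- Pre_ excludes exactly the inputs where A raises KeyError: some result without a 'filename' key.
def Pre_sort_results_by_prompt (results : List (List (String × String))) : Prop :=
  (results.all (fun r => r.any (fun p => p.1 == "filename"))) = true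
instance (results : List (List (String × String))) : Decidable (Pre_sort_results_by_prompt results) := by unfold Pre_sort_results_by_prompt; infer_instance

def pvWitness_sort_results_by_prompt : (List (List (String × String))) :=
  [[("filename", "a"), ("x", "1")], [("filename", "b")], [("filename", "a")]]

def Spec_sort_results_by_prompt (results : List (List (String × String))) (out : List (Int × List (List (String × String)))) : Prop := out = sort_results_by_prompt_alt results
instance (results : List (List (String × String))) (out : List (Int × List (List (String × String)))) : Decidable (Spec_sort_results_by_prompt results out) := by unfold Spec_sort_results_by_prompt; infer_instance

-- ===== CLAIM (what is proved, stated in full; the proofs are below) =====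
def Claim_equal_sort_results_by_prompt : Prop := ∀ (results : List (List (String × String))), Dom_sort_results_by_prompt results → Pre_sort_results_by_prompt results → Spec_sort_results_by_prompt results (sort_results_by_prompt results)

-- ===== LEMMAS AND PROOFS =====

-- a grouping fold 'd.setdefault(key r, []).append(r)' yields the groups in first-appearance key order
theorem items_groupFold {α κ : Type} [BEq κ] [LawfulBEq κ] (key : α → κ) (l : List α) :
    (l.foldl (fun d r => d.modify (key r) ([] : List α) (fun g => g ++ [r])) PySem.Dict.empty).items
    = (PySem.List.dedup (l.map key)).map (fun c => (c, l.filter (fun r => key r == c))) := by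
  have hnd : (l.foldl (fun d r => d.modify (key r) ([] : List α) (fun g => g ++ [r])) PySem.Dict.empty).keys.Nodup := by
    exact PySem.Dict.nodup_keys_foldl_modify_key l key [] (fun _ r => fun g => g ++ [r]) _ (by simp [PySem.Dict.keys_empty])
  rw [PySem.Dict.items_eq_map_keys _ hnd []]
  have hkeys : (l.foldl (fun d r => d.modify (key r) ([] : List α) (fun g => g ++ [r])) PySem.Dict.empty).keys
      = PySem.List.dedup (l.map key) := by
    rw [PySem.Dict.keys_foldl_modify_key l key [] (fun _ r => fun g => g ++ [r])]
    simp [PySem.Dict.keys_empty, PySem.Set.update_nil_left]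
  rw [hkeys]
  refine List.map_congr_left (fun c _ => ?_)
  have hfold : (l.foldl (fun d r => d.modify (key r) ([] : List α) (fun g => g ++ [r])) PySem.Dict.empty)
      = ((l.map (fun r => (key r, r))).foldl (fun d p => d.modify p.1 [] (fun g => g ++ [p.2])) PySem.Dict.empty) := by
    rw [List.foldl_map]
  rw [hfold, PySem.Dict.getD_foldl_modify_append]
  simp [PySem.Dict.getD_empty, List.filter_map, Function.comp_def]

-- the prompts_to_id loop over a Nodup list maps the j-th prompt to j
theorem pvPti_spec (L : List String) (hnd : L.Nodup) :
    (L.foldl pvPtiStep (PySem.Dict.empty, 0)).2 = (L.length : Int)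
    ∧ (∀ s, (L.foldl pvPtiStep (PySem.Dict.empty, 0)).1.contains s = decide (s ∈ L))
    ∧ (∀ j, (hj : j < L.length) → (L.foldl pvPtiStep (PySem.Dict.empty, 0)).1.getD L[j] 0 = (j : Int)) := by
  induction L using List.reverseRecOn with
  | nil => simp [PySem.Dict.contains_empty]
  | append_singleton M x ih =>
    have hMnd : M.Nodup := hnd.of_append_left
    have hx : x ∉ M := fun hm => (List.disjoint_of_nodup_append hnd) hm (by simp)
    obtain ⟨ih1, ih2, ih3⟩ := ih hMnd
    have hstep : (M ++ [x]).foldl pvPtiStep (PySem.Dict.empty, 0)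
        = pvPtiStep (M.foldl pvPtiStep (PySem.Dict.empty, 0)) x := by
      simp [List.foldl_append]
    have hcon : (M.foldl pvPtiStep (PySem.Dict.empty, 0)).1.contains x = false := by
      rw [ih2]; simp [hx]
    have hxstep : ∀ P : PySem.Dict String Int × Int, P.1.contains x = false →
        pvPtiStep P x = (P.1.insert x P.2, P.2 + 1) := by
      intro P hP; unfold pvPtiStep; rw [hP]; simp
    rw [hstep, hxstep _ hcon]
    refine ⟨by simp [ih1], fun s => ?_, fun j hj => ?_⟩
    · rw [PySem.Dict.contains_insert, ih2]
      by_cases hs : s = x <;> simp [hs]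
    · rcases Nat.lt_succ_iff_lt_or_eq.mp (by simpa using hj) with hjM | hjE
      · have hgetix : (M ++ [x])[j] = M[j] := by
          exact List.getElem_append_left hjM
        rw [hgetix, PySem.Dict.getD_insert_of_ne]
        · exact ih3 j hjM
        · intro hEq; exact hx (hEq ▸ List.getElem_mem hjM)
      · subst hjE
        have hgetx : (M ++ [x])[M.length]'(by simp) = x := by
          simp
        rw [hgetx, PySem.Dict.getD_insert_self, ih1]

-- dedup commutes with an injective-on-the-list map
theorem dedup_map_of_injOn {α β : Type} [BEq α] [LawfulBEq α] [BEq β] [LawfulBEq β]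
    (f : α → β) (xs : List α) (hinj : ∀ a ∈ xs, ∀ b ∈ xs, f a = f b → a = b) :
    PySem.List.dedup (xs.map f) = (PySem.List.dedup xs).map f := by
  induction xs using List.reverseRecOn with
  | nil => simp
  | append_singleton M x ih =>
    have hinjM : ∀ a ∈ M, ∀ b ∈ M, f a = f b → a = b := by
      intro a ha b hb; exact hinj a (by simp [ha]) b (by simp [hb])
    have hmem : f x ∈ PySem.List.dedup (M.map f) ↔ x ∈ PySem.List.dedup M := by
      rw [PySem.List.mem_dedup, PySem.List.mem_dedup, List.mem_map]
      constructor
      · rintro ⟨a, ha, hfa⟩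
        exact hinj a (by simp [ha]) x (by simp) hfa ▸ (hinj a (by simp [ha]) x (by simp) hfa) ▸ ha
      · intro hxM; exact ⟨x, hxM, rfl⟩
    simp only [List.map_append, List.map_cons, List.map_nil]
    rw [show PySem.List.dedup (M.map f ++ [f x]) = PySem.Set.add (PySem.Set.ofList (M.map f)) (f x) from by
          simp [PySem.Set.ofList_append_singleton],
        show PySem.List.dedup (M ++ [x]) = PySem.Set.add (PySem.Set.ofList M) x from by
          simp [PySem.Set.ofList_append_singleton]]
    rw [PySem.Set.add_eq_ite, PySem.Set.add_eq_ite]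
    have hofM : PySem.Set.ofList (M.map f) = PySem.List.dedup (M.map f) := by simp
    have hofM2 : PySem.Set.ofList M = PySem.List.dedup M := by simp
    rw [hofM, hofM2]
    by_cases hc : x ∈ PySem.List.dedup M
    · rw [if_pos (hmem.mpr hc), if_pos hc, ih hinjM]
    · rw [if_neg (fun h => hc (hmem.mp h)), if_neg hc, ih hinjM]
      simp

-- a Set.add-fold over a set already containing a skips every copy of a
theorem pvFoldl_add_of_mem {α : Type} [BEq α] [LawfulBEq α] (a : α) :
    ∀ (l s : List α), a ∈ s →
      l.foldl PySem.Set.add s = (l.filter (fun x => !(x == a))).foldl PySem.Set.add s := by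
  intro l
  induction l with
  | nil => intro s _; rfl
  | cons x t ih =>
    intro s ha
    by_cases hx : x = a
    · subst hx
      have hadd : PySem.Set.add s x = s := by rw [PySem.Set.add_eq_ite, if_pos ha]
      simp only [List.foldl_cons, List.filter_cons, beq_self_eq_true, Bool.not_true, hadd]
      exact ih s ha
    · have hmem : a ∈ PySem.Set.add s x := by
        rw [PySem.Set.add_eq_ite]; split_ifs with h
        · exact ha
        · exact List.mem_append_left _ ha
      simp only [List.foldl_cons, List.filter_cons, show (!(x == a)) = true by simp [hx], reduceIte]
      exact ih _ hmem

-- a Set.add-fold never touches a prefix disjoint from the inserted elements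
theorem pvFoldl_add_prefix {α : Type} [BEq α] [LawfulBEq α] :
    ∀ (l s t : List α), (∀ x ∈ l, x ∉ s) →
      l.foldl PySem.Set.add (s ++ t) = s ++ l.foldl PySem.Set.add t := by
  intro l
  induction l with
  | nil => intro s t _; rfl
  | cons x r ih =>
    intro s t hdis
    have hx : x ∉ s := hdis x (by simp)
    have hadd : PySem.Set.add (s ++ t) x = s ++ PySem.Set.add t x := by
      rw [PySem.Set.add_eq_ite, PySem.Set.add_eq_ite]
      have hm : (x ∈ s ++ t) ↔ (x ∈ t) := by simp [hx]
      by_cases h : x ∈ t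
      · rw [if_pos (hm.mpr h), if_pos h]
      · rw [if_neg (fun hh => h (hm.mp hh)), if_neg h]; simp
    simp only [List.foldl_cons, hadd]
    exact ih s _ (fun y hy => hdis y (by simp [hy]))

-- dedup keeps the head and dedups the tail with the head's copies removed
theorem pvDedup_cons {α : Type} [BEq α] [LawfulBEq α] (a : α) (l : List α) :
    PySem.List.dedup (a :: l) = a :: PySem.List.dedup (l.filter (fun x => !(x == a))) := by
  have h0 : PySem.List.dedup (a :: l) = l.foldl PySem.Set.add [a] := rfl
  rw [h0, pvFoldl_add_of_mem a l [a] (by simp)]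
  have h1 : (l.filter (fun x => !(x == a))).foldl PySem.Set.add ([a] ++ []) =
      [a] ++ (l.filter (fun x => !(x == a))).foldl PySem.Set.add [] := by
    apply pvFoldl_add_prefix
    intro x hx
    have hne : ¬(x == a) = true := by simpa using List.of_mem_filter hx
    simp only [List.mem_singleton]
    exact fun hEq => hne (by simp [hEq])
  simpa using h1

-- re-filtering the rest of a partition by a different key is filtering the whole list
theorem pvFilter_rest (rs : List (List (String × String))) (name c : String) (hc : c ≠ name) :
    ((rs.filter (fun s => !(pvFilename s == name))).filter (fun rr => pvFilename rr == c))
    = rs.filter (fun rr => pvFilename rr == c) := by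
  rw [List.filter_filter]
  apply List.filter_congr
  intro a _
  by_cases h : pvFilename a = c
  · simp [h, hc]
  · simp [h]

-- the peel-off loop produces exactly the first-appearance groups, numbered from promptId
theorem pvAltLoop_spec :
    ∀ (n : Nat) (rs : List (List (String × String))), rs.length ≤ n →
    ∀ (i : Int) (out : List (Int × List (List (String × String)))),
      pvAltLoop rs i out
      = out ++ PySem.List.enumerate
          ((PySem.List.dedup (rs.map pvFilename)).map
            (fun c => rs.filter (fun r => pvFilename r == c))) i := by
  intro n
  induction n with
  | zero =>
    intro rs h i out
    have : rs = [] := List.eq_nil_of_length_eq_zero (Nat.le_zero.mp h)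
    subst this
    simp [pvAltLoop]
  | succ n ih =>
    intro rs hlen i out
    match rs with
    | [] => simp [pvAltLoop]
    | r :: t =>
      rw [pvAltLoop]
      have hrest : (r :: t).filter (fun s => !(pvFilename s == pvFilename r))
          = t.filter (fun s => !(pvFilename s == pvFilename r)) := by
        simp
      have hrlen : ((r :: t).filter (fun s => !(pvFilename s == pvFilename r))).length ≤ n := by
        rw [hrest]
        exact le_trans (List.length_filter_le _ t) (Nat.succ_le_succ_iff.mp (by simpa using hlen))
      rw [ih _ hrlen]
      -- rewrite the dedup of the whole map as head :: dedup of the rest's map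
      have hmapfil : (t.map pvFilename).filter (fun x => !(x == pvFilename r))
          = (t.filter (fun s => !(pvFilename s == pvFilename r))).map pvFilename := by
        rw [List.filter_map]; rfl
      have hded : PySem.List.dedup ((r :: t).map pvFilename)
          = pvFilename r
            :: PySem.List.dedup (((r :: t).filter (fun s => !(pvFilename s == pvFilename r))).map pvFilename) := by
        rw [List.map_cons, pvDedup_cons, hmapfil, hrest]
      rw [hded, List.map_cons]
      -- the groups after the head can be filtered from the rest instead of the whole list
      have hφ : (PySem.List.dedup (((r :: t).filter (fun s => !(pvFilename s == pvFilename r))).map pvFilename)).map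
            (fun c => (r :: t).filter (fun rr => pvFilename rr == c))
          = (PySem.List.dedup (((r :: t).filter (fun s => !(pvFilename s == pvFilename r))).map pvFilename)).map
            (fun c => ((r :: t).filter (fun s => !(pvFilename s == pvFilename r))).filter
              (fun rr => pvFilename rr == c)) := by
        apply List.map_congr_left
        intro c hc
        obtain ⟨x, hxmem, hxc⟩ := List.mem_map.mp ((PySem.List.mem_dedup _ c).mp hc)
        have hcne : c ≠ pvFilename r := by
          have hxp := List.of_mem_filter (p := fun s => !(pvFilename s == pvFilename r)) hxmem
          simp only [Bool.not_eq_true', beq_eq_false_iff_ne] at hxp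
          exact hxc ▸ hxp
        exact (pvFilter_rest (r :: t) (pvFilename r) c hcne).symm
      rw [hφ]
      -- peel one element off the enumerate and reassociate
      have hcons : ∀ (g : List (List (String × String)))
          (gs : List (List (List (String × String)))) (k : Int),
          PySem.List.enumerate (g :: gs) k = (k, g) :: PySem.List.enumerate gs (k + 1) := fun _ _ _ => rfl
      rw [hcons]
      simp

-- ===== VERDICT (by name: the statement is the Claim_ definition above) =====
theorem sort_results_by_prompt_spec : Claim_equal_sort_results_by_prompt := by
  intro results _hDom _hPre
  have halt : sort_results_by_prompt_alt results
      = PySem.List.enumerate ((PySem.List.dedup (results.map pvFilename)).map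
          (fun c => results.filter (fun r => pvFilename r == c))) 0 := by
    show pvAltLoop results 0 [] = _
    rw [pvAltLoop_spec results.length results le_rfl 0 []]
    simp
  unfold Spec_sort_results_by_prompt sort_results_by_prompt
  rw [halt]
  set fs := results.map pvFilename with hfs
  set D := PySem.List.dedup fs with hD
  set pti := D.foldl pvPtiStep (PySem.Dict.empty, 0) with hpti
  obtain ⟨_, _, hidx⟩ := pvPti_spec D (PySem.List.nodup_dedup fs)
  set idx : String → Int := fun s => pti.1.getD s 0 with hidxdef
  have hidxD : ∀ j, (hj : j < D.length) → idx D[j] = (j : Int) := by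
    intro j hj; exact hidx j hj
  have hinj : ∀ a ∈ fs, ∀ b ∈ fs, idx a = idx b → a = b := by
    intro a ha b hb hEq
    have haD : a ∈ D := (PySem.List.mem_dedup fs a).mpr ha
    have hbD : b ∈ D := (PySem.List.mem_dedup fs b).mpr hb
    obtain ⟨p, hp, hpa⟩ := List.getElem_of_mem haD
    obtain ⟨q, hq, hqb⟩ := List.getElem_of_mem hbD
    rw [← hpa, ← hqb] at hEq ⊢
    rw [hidxD p hp, hidxD q hq] at hEq
    have : p = q := by exact_mod_cast hEq
    subst this; rfl
  rw [items_groupFold (fun r => idx (pvFilename r)) results]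
  have hmapmap : results.map (fun r => idx (pvFilename r)) = fs.map idx := by
    rw [hfs, List.map_map]; rfl
  rw [hmapmap, dedup_map_of_injOn idx fs hinj, ← hD]
  apply List.ext_getElem
  · simp [PySem.List.length_enumerate]
  · intro j hj1 hj2
    have hjD : j < D.length := by simpa using hj2
    rw [PySem.List.getElem_enumerate]
    simp only [List.getElem_map]
    rw [hidxD j hjD]
    refine Prod.ext (by simp) ?_
    apply List.filter_congr
    intro r hr
    have hrfs : pvFilename r ∈ fs := by rw [hfs]; exact List.mem_map_of_mem hr
    have hDj : D[j] ∈ fs := (PySem.List.mem_dedup fs D[j]).mp (List.getElem_mem hjD)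
    by_cases hEq : pvFilename r = D[j]
    · simp [hEq, hidxD j hjD]
    · have : idx (pvFilename r) ≠ (j : Int) := by
        intro hc
        exact hEq (hinj _ hrfs _ hDj (by rw [hc, hidxD j hjD]))
      simp [hEq, this]
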